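-- pv_equiv track=rewrite | github.com/RobertPaulig/Geometric_table | analysis/chem/decoys.py | _normalized_cmd
-- ===== SOURCE A (Python) =====
-- from typing import Dict, Iterable, List, Sequence, Tuple
--
-- def _normalized_cmd(argv: Sequence[str]) -> List[str]:
--     # Keep a stable command string for audits/tests: drop `--out <path>` and `--input <path>`.
--     out: List[str] = []
--     skip_next = False
--     for token in argv:
--         if skip_next:
--             skip_next = False
--             continue
--         if token in {"--out", "--input"}:
--             skip_next = True
--             continue
--         out.append(token)
--     return out
-- ===== SOURCE B (Python) =====
-- from typing import List, Sequence
--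
-- def _normalized_cmd(argv: Sequence[str]) -> List[str]:
--     # Find-and-slice: repeatedly locate the earliest flag occurrence with
--     # list.index, keep everything before it, and cut out the flag + its value.
--     rest = list(argv)
--     out: List[str] = []
--     while True:
--         idxs = [rest.index(f) for f in ("--out", "--input") if f in rest]
--         if not idxs:
--             return out + rest
--         k = min(idxs)
--         out.extend(rest[:k])
--         rest = rest[k + 2:]
-- ===== Notes on version B (the rewrite author's own statement) =====
-- stated objective: alternative
-- what changed: Replaced the per-token loop carrying a skip_next boolean with a find-and-slice algorithm: repeatedly locate the earliest flag via list.index, keep the prefix before it, and slice past the flag and its value.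
import Mathlib
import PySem

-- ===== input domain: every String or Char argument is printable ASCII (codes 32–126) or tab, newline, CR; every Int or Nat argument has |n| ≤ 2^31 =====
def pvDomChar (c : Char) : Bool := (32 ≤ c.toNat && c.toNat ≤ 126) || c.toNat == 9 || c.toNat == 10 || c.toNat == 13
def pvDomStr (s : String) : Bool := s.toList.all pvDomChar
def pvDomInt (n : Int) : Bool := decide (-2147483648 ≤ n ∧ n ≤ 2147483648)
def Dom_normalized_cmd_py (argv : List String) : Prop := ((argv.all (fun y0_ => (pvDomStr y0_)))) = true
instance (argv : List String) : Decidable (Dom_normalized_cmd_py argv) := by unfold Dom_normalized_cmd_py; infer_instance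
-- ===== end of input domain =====

-- B replaces the skip_next token loop with a find-and-slice algorithm (locate earliest flag via list.index, keep the prefix, cut flag+value); alternative decomposition, same result.


-- ===== PORT A =====
-- for token in argv with accumulator (out, skip_next)
def normalized_cmd_py (argv : List String) : List String :=
  (argv.foldl
    (fun (st : List String × Bool) token =>
      if st.2 then (st.1, false)
      else if token = "--out" ∨ token = "--input" then (st.1, true)
      else (st.1 ++ [token], st.2))
    ([], false)).1

-- ===== PORT B =====
-- idxs = [rest.index(f) for f in ("--out", "--input") if f in rest]; k = min(idxs)
def pvFlagIdxs (rest : List String) : List Nat :=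
  (["--out", "--input"].filter (fun f => decide (f ∈ rest))).filterMap
    (fun f => PySem.List.index? rest f)

-- termination helper cited by the port: the earliest flag index is in range
theorem pvFlagIdx_lt (rest : List String) (k : Nat)
    (h : PySem.List.min? (pvFlagIdxs rest) (fun x => x) = some k) : k < rest.length := by
  have hk : k ∈ pvFlagIdxs rest := PySem.List.min?_mem h
  unfold pvFlagIdxs at hk
  rcases List.mem_filterMap.mp hk with ⟨f, _, hidx⟩
  rcases PySem.List.getElem_of_index?_eq_some hidx with ⟨hlt, _, _⟩
  exact hlt

-- while loop of B: keep rest[:k], continue past flag+value with rest[k+2:]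
-- (rest[:k] and rest[k+2:] with 0 ≤ k are exactly take/drop: PySem.List.slice_to_natCast / slice_from_natCast)
def normalized_cmd_py_alt_go (rest : List String) : List String :=
  match h : PySem.List.min? (pvFlagIdxs rest) (fun x => x) with
  | none => rest
  | some k => rest.take k ++ normalized_cmd_py_alt_go (rest.drop (k + 2))
termination_by rest.length
decreasing_by
  have := pvFlagIdx_lt rest k h
  simp only [List.length_drop]; omega

def normalized_cmd_py_alt (argv : List String) : List String :=
  normalized_cmd_py_alt_go argv

-- ===== PRECONDITION & SPEC =====
def Spec_normalized_cmd_py (argv : List String) (out : List String) : Prop := out = normalized_cmd_py_alt argv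
instance (argv : List String) (out : List String) : Decidable (Spec_normalized_cmd_py argv out) := by unfold Spec_normalized_cmd_py; infer_instance

-- ===== CLAIM (what is proved, stated in full; the proofs are below) =====
def Claim_equal_normalized_cmd_py : Prop := ∀ (argv : List String), Dom_normalized_cmd_py argv → Spec_normalized_cmd_py argv (normalized_cmd_py argv)

-- ===== LEMMAS AND PROOFS =====

-- common structural characterization of the filtered command line
def pvFilt : List String → List String
  | [] => []
  | [x] => if x = "--out" ∨ x = "--input" then [] else [x]
  | x :: y :: ys =>
    if x = "--out" ∨ x = "--input" then pvFilt ys else x :: pvFilt (y :: ys)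

theorem pvFilt_cons (x : String) (t : List String) :
    pvFilt (x :: t) = if x = "--out" ∨ x = "--input" then pvFilt (t.drop 1) else x :: pvFilt t := by
  cases t <;> simp [pvFilt]

-- A side: the foldl with skip_next computes pvFilt
theorem normalized_cmd_py_fold (xs : List String) : ∀ acc : List String,
    (xs.foldl
      (fun (st : List String × Bool) token =>
        if st.2 then (st.1, false)
        else if token = "--out" ∨ token = "--input" then (st.1, true)
        else (st.1 ++ [token], st.2))
      (acc, false)).1 = acc ++ pvFilt xs := by
  induction xs using pvFilt.induct with
  | case1 => simp [pvFilt]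
  | case2 x hx =>
    intro acc; simp [List.foldl, pvFilt, hx]
  | case3 x hx =>
    intro acc; simp [List.foldl, pvFilt, hx]
  | case4 x y ys hx ih =>
    intro acc; simp [List.foldl, pvFilt, hx, ih]
  | case5 x y ys hx ih =>
    intro acc
    rw [List.foldl_cons]
    simp only [Bool.false_eq_true, if_false, if_neg hx]
    rw [ih (acc ++ [x])]
    simp [pvFilt_cons, hx]

-- no flag in rest → pvFilt keeps everything
theorem pvFilt_no_flag (rest : List String)
    (h : ∀ x ∈ rest, ¬(x = "--out" ∨ x = "--input")) : pvFilt rest = rest := by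
  induction rest with
  | nil => simp [pvFilt]
  | cons x t ih =>
    rw [pvFilt_cons, if_neg (h x (by simp))]
    rw [ih (fun y hy => h y (by simp [hy]))]

-- pvFilt splits at the first flag position
theorem pvFilt_split : ∀ (k : Nat) (rest : List String),
    (hk : k < rest.length) → (rest[k] = "--out" ∨ rest[k] = "--input") →
    (∀ j (hj : j < k), ¬(rest[j]'(by omega) = "--out" ∨ rest[j]'(by omega) = "--input")) →
    pvFilt rest = rest.take k ++ pvFilt (rest.drop (k + 2)) := by
  intro k
  induction k with
  | zero =>
    intro rest hk hflag _
    cases rest with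
    | nil => simp at hk
    | cons x t =>
      simp at hflag
      rw [pvFilt_cons, if_pos hflag]
      simp
  | succ k ih =>
    intro rest hk hflag hmin
    cases rest with
    | nil => simp at hk
    | cons x t =>
      have hx : ¬(x = "--out" ∨ x = "--input") := by
        have := hmin 0 (by omega); simpa using this
      rw [pvFilt_cons, if_neg hx]
      have ht := ih t (by simpa using hk) (by simpa using hflag)
        (fun j hj => by
          have := hmin (j + 1) (by omega)
          simpa using this)
      simp [ht]

-- min? over pvFlagIdxs = none → no flag occurs in rest
theorem pvFlagIdxs_none (rest : List String)
    (h : PySem.List.min? (pvFlagIdxs rest) (fun x => x) = none) :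
    ∀ x ∈ rest, ¬(x = "--out" ∨ x = "--input") := by
  have hnil : pvFlagIdxs rest = [] := (PySem.List.min?_eq_none_iff _ _).mp h
  intro x hx hflag
  have hxmem : x ∈ ["--out", "--input"].filter (fun f => decide (f ∈ rest)) := by
    rcases hflag with h1 | h1 <;> subst h1 <;> simp [List.mem_filter, hx]
  rcases hidx : PySem.List.index? rest x with _ | i
  · rw [PySem.List.index?_eq_none_iff] at hidx; exact hidx hx
  · have : i ∈ pvFlagIdxs rest := by
      unfold pvFlagIdxs
      exact List.mem_filterMap.mpr ⟨x, hxmem, hidx⟩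
    simp [hnil] at this

-- min? over pvFlagIdxs = some k → k is the earliest flag position
theorem pvFlagIdxs_some (rest : List String) (k : Nat)
    (h : PySem.List.min? (pvFlagIdxs rest) (fun x => x) = some k) :
    ∃ hk : k < rest.length,
      (rest[k] = "--out" ∨ rest[k] = "--input") ∧
      ∀ j (hj : j < k), ¬(rest[j]'(by omega) = "--out" ∨ rest[j]'(by omega) = "--input") := by
  have hkmem : k ∈ pvFlagIdxs rest := PySem.List.min?_mem h
  rcases List.mem_filterMap.mp hkmem with ⟨f, hf, hidx⟩
  rcases PySem.List.getElem_of_index?_eq_some hidx with ⟨hlt, hget, _⟩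
  have hfflag : f = "--out" ∨ f = "--input" := by
    simp [List.mem_filter] at hf; tauto
  refine ⟨hlt, by rw [hget]; exact hfflag, ?_⟩
  intro j hj hflag
  -- a flag at position j < k would give an index ≤ j in pvFlagIdxs, contradicting minimality
  have hjlt : j < rest.length := by omega
  have hmem : rest[j]'hjlt ∈ rest := List.getElem_mem _
  rcases hidx2 : PySem.List.index? rest (rest[j]'hjlt) with _ | i
  · rw [PySem.List.index?_eq_none_iff] at hidx2; exact hidx2 hmem
  · have hiidx : i ∈ pvFlagIdxs rest := by
      unfold pvFlagIdxs
      refine List.mem_filterMap.mpr ⟨rest[j]'hjlt, ?_, hidx2⟩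
      rcases hflag with h1 | h1 <;> rw [h1] <;> simp [List.mem_filter, h1 ▸ hmem]
    have hile : i ≤ j := by
      by_contra hgt
      rcases PySem.List.getElem_of_index?_eq_some hidx2 with ⟨_, _, hfirst⟩
      exact hfirst j (by omega) rfl
    have := PySem.List.min?_isMin h _ hiidx
    simp at this
    omega

-- B computes pvFilt
theorem normalized_cmd_py_alt_go_eq (rest : List String) :
    normalized_cmd_py_alt_go rest = pvFilt rest := by
  induction rest using normalized_cmd_py_alt_go.induct with
  | case1 rest h =>
    rw [normalized_cmd_py_alt_go, h, pvFilt_no_flag rest (pvFlagIdxs_none rest h)]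
  | case2 rest k h ih =>
    rw [normalized_cmd_py_alt_go, h]
    dsimp only
    rcases pvFlagIdxs_some rest k h with ⟨hk, hflag, hmin⟩
    rw [ih, pvFilt_split k rest hk hflag hmin]

-- ===== VERDICT (by name: the statement is the Claim_ definition above) =====
theorem normalized_cmd_py_spec : Claim_equal_normalized_cmd_py := by
  intro argv _
  unfold Spec_normalized_cmd_py normalized_cmd_py normalized_cmd_py_alt
  rw [normalized_cmd_py_alt_go_eq, normalized_cmd_py_fold]
  simp
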